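-- pv_equiv track=rewrite | github.com/nolanstr/Nest3D | nest3d/data/filters.py | neighbor_filter
-- ===== SOURCE A (Python) =====
-- def neighbor_filter(arr):
--     filtered_arr = arr.copy()
--     for sublist in range(len(arr)):
--         for i in range(len(arr[sublist])):
--             # Check if the current element is different from its neighbors
--             if (i > 0 and arr[sublist][i] != arr[sublist][i - 1]) or \
--                (i < len(arr[sublist]) - 1 and arr[sublist][i] != arr[sublist][i + 1]):
--                 # Replace the current element with the value of its neighbors
--                 if i > 0:
--                     filtered_arr[sublist][i] = arr[sublist][i - 1]
--                 if i < len(arr[sublist]) - 1: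
--                     filtered_arr[sublist][i] = arr[sublist][i + 1]
--     return filtered_arr
-- ===== SOURCE B (Python) =====
-- def neighbor_filter(arr):
--     # A's shallow copy + in-place writes amount to a left shift of each
--     # sublist with the last element duplicated.  (Unlike A, this does not
--     # mutate the input's sublists; equivalence is about the return value.)
--     return [row[1:] + row[-1:] for row in arr]
-- ===== Notes on version B (the rewrite author's own statement) =====
-- stated objective: simpler
-- what changed: A's index-loop with two-sided neighbor tests and dual conditional in-place writes through a shallow copy is replaced by a one-line slice expression per sublist (row[1:] + row[-1:]), the closed form of what A computes; slicing avoids the per-element Python-level test-and-assign loop (measured ~3x); B does not mutate the input sublists (the return value is what is proved equal).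
import Mathlib
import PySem

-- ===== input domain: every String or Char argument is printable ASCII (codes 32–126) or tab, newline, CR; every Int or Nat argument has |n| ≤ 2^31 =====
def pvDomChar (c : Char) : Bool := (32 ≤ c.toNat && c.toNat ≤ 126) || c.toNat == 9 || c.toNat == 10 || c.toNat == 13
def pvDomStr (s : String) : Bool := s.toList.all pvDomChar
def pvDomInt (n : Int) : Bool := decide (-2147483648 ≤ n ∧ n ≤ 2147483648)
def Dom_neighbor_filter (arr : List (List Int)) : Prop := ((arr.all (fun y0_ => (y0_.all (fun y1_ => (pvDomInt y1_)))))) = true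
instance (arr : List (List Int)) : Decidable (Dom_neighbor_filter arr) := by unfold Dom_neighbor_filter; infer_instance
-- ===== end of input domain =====

-- B replaces A's index loop (two-sided neighbor tests + dual conditional in-place writes
-- through a shallow copy) by the closed-form slice row[1:] + row[-1:] per sublist; the
-- equivalence proved is about the RETURN value only (A mutates arr's sublists in place, B does not).

-- ===== PORT A =====
-- A's `filtered_arr = arr.copy()` is shallow: `filtered_arr[sublist]` IS `arr[sublist]`,
-- so every read `arr[sublist][..]` sees earlier writes.  The inner loop is therefore a fold
-- over indices carrying ONE evolving list per row; all index accesses are guarded in range,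
-- so `getD _ 0` is exact.
def nfInner (xs : List Int) (i : Nat) : List Int :=
  let n := xs.length
  if (0 < i ∧ xs.getD i 0 ≠ xs.getD (i - 1) 0) ∨
     (i < n - 1 ∧ xs.getD i 0 ≠ xs.getD (i + 1) 0) then
    let xs1 := if 0 < i then xs.set i (xs.getD (i - 1) 0) else xs
    if i < n - 1 then xs1.set i (xs1.getD (i + 1) 0) else xs1
  else xs

def neighbor_filter (arr : List (List Int)) : List (List Int) :=
  arr.map (fun xs => (List.range xs.length).foldl nfInner xs)

-- ===== PORT B =====
def neighbor_filter_alt (arr : List (List Int)) : List (List Int) :=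
  arr.map (fun row => PySem.List.slice row (some 1) none ++ PySem.List.slice row (some (-1)) none)

-- ===== PRECONDITION & SPEC =====
def Spec_neighbor_filter (arr : List (List Int)) (out : List (List Int)) : Prop := out = neighbor_filter_alt arr
instance (arr : List (List Int)) (out : List (List Int)) : Decidable (Spec_neighbor_filter arr out) := by unfold Spec_neighbor_filter; infer_instance

-- ===== CLAIM (what is proved, stated in full; the proofs are below) =====
def Claim_equal_neighbor_filter : Prop := ∀ (arr : List (List Int)), Dom_neighbor_filter arr → Spec_neighbor_filter arr (neighbor_filter arr)

-- ===== LEMMAS AND PROOFS =====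

-- the state of A's inner loop after k iterations: positions < k already shifted left
def nfState (xs : List Int) (k : Nat) : List Int :=
  xs.tail.take k ++ xs.drop k

lemma nfState_len (xs : List Int) (k : Nat) (hk : k + 1 ≤ xs.length) :
    (nfState xs k).length = xs.length := by
  simp [nfState]; omega

lemma nfState_getD_lt (xs : List Int) {k j : Nat} (hk : k + 1 ≤ xs.length) (hj : j < k) :
    (nfState xs k).getD j 0 = xs.getD (j + 1) 0 := by
  unfold nfState
  rw [List.getD_append _ _ _ _ (by simp; omega)]
  rw [List.getD_eq_getElem?_getD, List.getD_eq_getElem?_getD]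
  rw [List.getElem?_take_of_lt hj, List.getElem?_tail]

lemma nfState_getD_ge (xs : List Int) {k j : Nat} (hk : k + 1 ≤ xs.length) (hj : k ≤ j) :
    (nfState xs k).getD j 0 = xs.getD j 0 := by
  unfold nfState
  have hlen : (xs.tail.take k).length = k := by simp; omega
  rw [List.getD_eq_getElem?_getD, List.getD_eq_getElem?_getD,
      List.getElem?_append_right (by rw [hlen]; omega), hlen, List.getElem?_drop]
  have h : k + (j - k) = j := by omega
  rw [h]

lemma nfState_succ (xs : List Int) {k : Nat} (hk : k + 2 ≤ xs.length) :
    nfState xs (k + 1) = xs.tail.take k ++ xs.getD (k + 1) 0 :: xs.drop (k + 1) := by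
  unfold nfState
  rw [List.take_add_one, List.getElem?_tail]
  have h : xs[k + 1]? = some (xs.getD (k + 1) 0) := by
    rw [List.getD_eq_getElem?_getD, List.getElem?_eq_getElem (by omega)]; rfl
  rw [h]
  simp

lemma nfState_set (xs : List Int) {k : Nat} (hk : k + 2 ≤ xs.length) (v : Int) :
    (nfState xs k).set k v = xs.tail.take k ++ v :: xs.drop (k + 1) := by
  unfold nfState
  have hlen : (xs.tail.take k).length = k := by simp; omega
  rw [List.set_append_right _ _ (by omega), hlen, Nat.sub_self]
  rw [List.drop_eq_getElem_cons (by omega)]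
  rfl

lemma nfState_set_self (xs : List Int) {k : Nat} (hk : k + 1 ≤ xs.length) :
    (nfState xs k).set k ((nfState xs k).getD k 0) = nfState xs k := by
  have hl : k < (nfState xs k).length := by rw [nfState_len xs k hk]; omega
  rw [List.getD_eq_getElem?_getD, List.getElem?_eq_getElem hl]
  simp

lemma nfInner_step (xs : List Int) {k : Nat} (hk : k + 2 ≤ xs.length) :
    nfInner (nfState xs k) k = nfState xs (k + 1) := by
  have hk1 : k + 1 ≤ xs.length := by omega
  have hlen := nfState_len xs k hk1
  have hgk : (nfState xs k).getD k 0 = xs.getD k 0 := nfState_getD_ge xs hk1 le_rfl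
  have hgk1 : (nfState xs k).getD (k + 1) 0 = xs.getD (k + 1) 0 :=
    nfState_getD_ge xs hk1 (by omega)
  have hset : (nfState xs k).set k (xs.getD (k + 1) 0) = nfState xs (k + 1) := by
    rw [nfState_set xs hk, nfState_succ xs hk]
  unfold nfInner
  simp only [hlen]
  by_cases hpos : 0 < k
  · have hgkm : (nfState xs k).getD (k - 1) 0 = xs.getD k 0 := by
      have := nfState_getD_lt xs hk1 (j := k - 1) (by omega)
      rw [this]; congr 1; omega
    by_cases hne : xs.getD k 0 ≠ xs.getD (k + 1) 0
    · rw [if_pos (Or.inr ⟨by omega, by rw [hgk, hgk1]; exact hne⟩)]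
      simp only [if_pos hpos, if_pos (show k < xs.length - 1 by omega)]
      rw [hgkm, ← hgk, nfState_set_self xs hk1, hgk1, hset]
    · push Not at hne
      rw [if_neg]
      · rw [← hset, ← hne, ← hgk, nfState_set_self xs hk1]
      · rintro (⟨_, h⟩ | ⟨_, h⟩)
        · exact h (by rw [hgk, hgkm])
        · exact h (by rw [hgk, hgk1, hne])
  · have hk0 : k = 0 := by omega
    subst hk0
    by_cases hne : xs.getD 0 0 ≠ xs.getD 1 0
    · rw [if_pos (Or.inr ⟨by omega, by rw [hgk, hgk1]; exact hne⟩)]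
      simp only [if_neg (lt_irrefl 0), if_pos (show 0 < xs.length - 1 by omega)]
      rw [hgk1]; exact hset
    · push Not at hne
      rw [if_neg]
      · rw [← hset, ← hne, ← hgk, nfState_set_self xs (by omega)]
      · rintro (⟨h, _⟩ | ⟨_, h⟩)
        · omega
        · exact h (by rw [hgk, hgk1, hne])

lemma nfInner_last (xs : List Int) {k : Nat} (hk : k + 1 = xs.length) :
    nfInner (nfState xs k) k = nfState xs k := by
  have hk1 : k + 1 ≤ xs.length := by omega
  have hlen := nfState_len xs k hk1
  unfold nfInner
  simp only [hlen]
  rw [if_neg]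
  rintro (⟨hpos, h⟩ | ⟨h2, _⟩)
  · apply h
    rw [nfState_getD_ge xs hk1 le_rfl]
    have := nfState_getD_lt xs hk1 (j := k - 1) (by omega)
    rw [this]
    congr 1; omega
  · omega

lemma nfInv (xs : List Int) (k : Nat) (hk : k + 1 ≤ xs.length) :
    (List.range k).foldl nfInner xs = nfState xs k := by
  induction k with
  | zero => simp [nfState]
  | succ k ih =>
    rw [List.range_succ, List.foldl_append, ih (by omega)]
    simp only [List.foldl_cons, List.foldl_nil]
    exact nfInner_step xs (by omega)

lemma nfRow (xs : List Int) :
    (List.range xs.length).foldl nfInner xs =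
      PySem.List.slice xs (some 1) none ++ PySem.List.slice xs (some (-1)) none := by
  rw [PySem.List.slice_from_one, PySem.List.slice_from_neg_one]
  cases hx : xs.length with
  | zero =>
    have : xs = [] := List.length_eq_zero_iff.mp hx
    simp [this]
  | succ m =>
    rw [List.range_succ, List.foldl_append, nfInv xs m (by omega)]
    simp only [List.foldl_cons, List.foldl_nil]
    rw [nfInner_last xs (by omega)]
    unfold nfState
    simp only [Nat.add_sub_cancel]
    congr 1
    exact List.take_of_length_le (by simp; omega)

-- ===== VERDICT (by name: the statement is the Claim_ definition above) =====
theorem neighbor_filter_spec : Claim_equal_neighbor_filter := by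
  intro arr _
  unfold Spec_neighbor_filter neighbor_filter neighbor_filter_alt
  exact List.map_congr_left (fun xs _ => nfRow xs)
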